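-- pv_equiv track=rewrite | github.com/AdamZhouSE/pythonHomework | Code/CodeRecords/2764/58547/295390.py | calc_max_split
-- ===== SOURCE A (Python) =====
-- def calc_max_split(number):
--     if number <= 4:
--         return number
--
--     return max(
--         number,
--         sum([
--             calc_max_split(number // 2),
--             calc_max_split(number // 3),
--             calc_max_split(number // 4)
--         ])
--     )
-- ===== SOURCE B (Python) =====
-- def calc_max_split(number):
--     cache = {}
--
--     def go(n):
--         if n <= 4:
--             return n
--         if n in cache:
--             return cache[n]
--         r = max(n, go(n // 2) + go(n // 3) + go(n // 4))
--         cache[n] = r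
--         return r
--
--     return go(number)
-- ===== Notes on version B (the rewrite author's own statement) =====
-- stated objective: faster
-- what changed: B memoizes the recursion in a dict keyed by the reachable quotients, so each distinct subproblem is solved once instead of the exponential tree of repeated calls in A.
import Mathlib
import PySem

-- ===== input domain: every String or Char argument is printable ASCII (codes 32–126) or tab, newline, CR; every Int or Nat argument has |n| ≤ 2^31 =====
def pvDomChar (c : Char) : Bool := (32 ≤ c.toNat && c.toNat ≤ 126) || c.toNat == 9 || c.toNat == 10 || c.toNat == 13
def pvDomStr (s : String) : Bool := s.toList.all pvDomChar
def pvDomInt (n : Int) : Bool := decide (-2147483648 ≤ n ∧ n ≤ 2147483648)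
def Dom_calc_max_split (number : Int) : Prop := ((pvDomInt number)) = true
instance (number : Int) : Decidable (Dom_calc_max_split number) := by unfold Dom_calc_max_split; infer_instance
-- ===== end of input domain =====

-- B memoizes the recursion with a dict cache so each distinct quotient is solved once (asymptotically faster than A's repeated recursion).

-- termination helper, cited by both ports' decreasing_by
theorem pv_floordiv_toNat_lt (n k : Int) (hk : 1 < k) (hn : ¬ n ≤ 4) :
    (PySem.Int.floordiv n k).toNat < n.toNat := by
  obtain ⟨m, rfl⟩ : ∃ m : Nat, n = (m : Int) := ⟨n.toNat, by omega⟩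
  obtain ⟨j, rfl⟩ : ∃ j : Nat, k = (j : Int) := ⟨k.toNat, by omega⟩
  rw [PySem.Int.floordiv_natCast]
  simp only [Int.toNat_natCast]
  exact Nat.div_lt_self (by omega) (by omega)

-- ===== PORT A =====
def calc_max_split (number : Int) : Int :=
  if number ≤ 4 then number
  else
    max number
      (calc_max_split (PySem.Int.floordiv number 2) +
       calc_max_split (PySem.Int.floordiv number 3) +
       calc_max_split (PySem.Int.floordiv number 4))
termination_by number.toNat
decreasing_by
  · exact pv_floordiv_toNat_lt number 2 (by norm_num) (by assumption)
  · exact pv_floordiv_toNat_lt number 3 (by norm_num) (by assumption)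
  · exact pv_floordiv_toNat_lt number 4 (by norm_num) (by assumption)

-- ===== PORT B =====
-- transliteration of Source B's inner `go`, threading the mutable dict `cache`
def goMemo (n : Int) (cache : PySem.Dict Int Int) : Int × PySem.Dict Int Int :=
  if n ≤ 4 then (n, cache)
  else
    match cache.get? n with
    | some v => (v, cache)
    | none =>
      let p1 := goMemo (PySem.Int.floordiv n 2) cache
      let p2 := goMemo (PySem.Int.floordiv n 3) p1.2
      let p3 := goMemo (PySem.Int.floordiv n 4) p2.2
      let r := max n (p1.1 + p2.1 + p3.1)
      (r, p3.2.insert n r)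
termination_by n.toNat
decreasing_by
  · exact pv_floordiv_toNat_lt n 2 (by norm_num) (by assumption)
  · exact pv_floordiv_toNat_lt n 3 (by norm_num) (by assumption)
  · exact pv_floordiv_toNat_lt n 4 (by norm_num) (by assumption)

def calc_max_split_alt (number : Int) : Int :=
  (goMemo number PySem.Dict.empty).1

-- ===== PRECONDITION & SPEC =====
def Spec_calc_max_split (number : Int) (out : Int) : Prop := out = calc_max_split_alt number
instance (number : Int) (out : Int) : Decidable (Spec_calc_max_split number out) := by unfold Spec_calc_max_split; infer_instance

-- ===== CLAIM (what is proved, stated in full; the proofs are below) =====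
def Claim_equal_calc_max_split : Prop := ∀ (number : Int), Dom_calc_max_split number → Spec_calc_max_split number (calc_max_split number)

-- ===== LEMMAS AND PROOFS =====

-- cache coherence: every cached value is the true result of A
def Coh (c : PySem.Dict Int Int) : Prop :=
  ∀ k v, c.get? k = some v → v = calc_max_split k

theorem calc_step (n : Int) (h : ¬ n ≤ 4) :
    calc_max_split n =
      max n (calc_max_split (PySem.Int.floordiv n 2) +
             calc_max_split (PySem.Int.floordiv n 3) +
             calc_max_split (PySem.Int.floordiv n 4)) := by
  rw [calc_max_split, if_neg h]

theorem goMemo_correct (n : Int) (c : PySem.Dict Int Int) (hc : Coh c) :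
    (goMemo n c).1 = calc_max_split n ∧ Coh (goMemo n c).2 := by
  by_cases h : n ≤ 4
  · rw [goMemo, calc_max_split]
    simp [h, hc]
  · rcases hget : c.get? n with _ | v
    · have ih1 := goMemo_correct (PySem.Int.floordiv n 2) c hc
      have ih2 := goMemo_correct (PySem.Int.floordiv n 3) (goMemo (PySem.Int.floordiv n 2) c).2 ih1.2
      have ih3 := goMemo_correct (PySem.Int.floordiv n 4)
        (goMemo (PySem.Int.floordiv n 3) (goMemo (PySem.Int.floordiv n 2) c).2).2 ih2.2
      rw [goMemo]
      simp only [if_neg h, hget]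
      refine ⟨?_, ?_⟩
      · rw [calc_step n h, ih1.1, ih2.1, ih3.1]
      · intro k v hkv
        rw [PySem.Dict.get?_insert] at hkv
        by_cases hk : k = n
        · subst hk
          rw [if_pos rfl] at hkv
          have hv := (Option.some.injEq _ _).mp hkv
          rw [← hv, ih1.1, ih2.1, ih3.1, calc_step k h]
        · rw [if_neg hk] at hkv
          exact ih3.2 k v hkv
    · rw [goMemo]
      simp only [if_neg h, hget]
      exact ⟨hc n v hget, hc⟩
termination_by n.toNat
decreasing_by
  · exact pv_floordiv_toNat_lt n 2 (by norm_num) h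
  · exact pv_floordiv_toNat_lt n 3 (by norm_num) h
  · exact pv_floordiv_toNat_lt n 4 (by norm_num) h

-- ===== VERDICT (by name: the statement is the Claim_ definition above) =====
theorem calc_max_split_spec : Claim_equal_calc_max_split := by
  intro number _
  have hempty : Coh PySem.Dict.empty := by
    intro k v h
    simp [PySem.Dict.get?_empty] at h
  have := goMemo_correct number PySem.Dict.empty hempty
  unfold Spec_calc_max_split calc_max_split_alt
  exact this.1.symm
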